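-- pv_equiv track=rewrite | github.com/zhangdadi/MobileLocalization | backend/main.py | serialize_ios_rows
-- ===== SOURCE A (Python) =====
-- from typing import Literal
--
-- LanguageCode = Literal["en", "ar", "tr"]
--
-- def escape_ios_value(value: str) -> str:
--     return (
--         value.replace("\\", "\\\\")
--         .replace('"', '\\"')
--         .replace("\n", "\\n")
--         .replace("\r", "\\r")
--         .replace("\t", "\\t")
--     )
--
-- def serialize_ios_rows(rows: list[dict[str, str]], language: LanguageCode) -> str:
--     lines: list[str] = []
--     for row in rows:
--         key = row["key"].strip()
--         if not key:
--             continue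
--         value = row.get(language, "")
--         lines.append(f'"{escape_ios_value(key)}" = "{escape_ios_value(value)}";')
--
--     if not lines:
--         return ""
--
--     return "\n".join(lines) + "\n"
-- ===== SOURCE B (Python) =====
-- ESC = {"\\": "\\\\", '"': '\\"', "\n": "\\n", "\r": "\\r", "\t": "\\t"}
--
-- def serialize_ios_rows(rows, language):
--     out = []  # flat buffer of output pieces, one per emitted character
--     for row in rows:
--         key = row["key"].strip()
--         if not key:
--             continue
--         out.append('"')
--         for c in key:
--             out.append(ESC.get(c, c))
--         out.append('" = "')
--         for c in row.get(language, ""):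
--             out.append(ESC.get(c, c))
--         out.append('";\n')
--     return "".join(out)
-- ===== Notes on version B (the rewrite author's own statement) =====
-- stated objective: alternative
-- what changed: A works in stages (escape each whole string via five sequential str.replace passes, format a per-row line, collect a list of lines, then a conditional '\n'.join + '\n'); B is a fused streaming emitter: one loop appends the escaped form of each character (a dict lookup) of each kept row directly into one flat output buffer together with the surrounding quote/assignment/newline pieces, so no escaped intermediate strings, no line list and no join-of-lines exist.
import Mathlib
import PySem

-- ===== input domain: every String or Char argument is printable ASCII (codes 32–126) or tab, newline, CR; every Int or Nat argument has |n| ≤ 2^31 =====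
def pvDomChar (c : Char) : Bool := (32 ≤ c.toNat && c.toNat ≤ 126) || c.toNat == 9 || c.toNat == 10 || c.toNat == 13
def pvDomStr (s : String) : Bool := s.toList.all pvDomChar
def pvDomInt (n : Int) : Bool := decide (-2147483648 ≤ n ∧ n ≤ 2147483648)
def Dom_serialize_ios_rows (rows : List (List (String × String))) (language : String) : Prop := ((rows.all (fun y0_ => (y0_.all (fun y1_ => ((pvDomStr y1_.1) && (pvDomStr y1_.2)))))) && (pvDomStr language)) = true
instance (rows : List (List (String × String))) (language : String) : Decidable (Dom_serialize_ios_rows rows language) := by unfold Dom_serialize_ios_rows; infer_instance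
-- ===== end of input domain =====

-- B replaces A's staged pipeline (five replace passes per string, per-row lines, list,
-- conditional join + trailing newline) by one fused emitter that appends the escaped form of
-- each character directly into a single flat output buffer (objective: alternative).

-- ===== PORT A =====
-- escape_ios_value (here pvEscA): five sequential replaces (on the List Char side, as PySem defines them)
def pvEscA (cs : List Char) : List Char :=
  PySem.Chars.replace
    (PySem.Chars.replace
      (PySem.Chars.replace
        (PySem.Chars.replace
          (PySem.Chars.replace cs ['\\'] ['\\', '\\'])
          ['"'] ['\\', '"'])
        ['\n'] ['\\', 'n'])
      ['\r'] ['\\', 'r'])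
    ['\t'] ['\\', 't']

def serialize_ios_rows (rows : List (List (String × String))) (language : String) : String :=
  let lines : List (List Char) :=
    rows.foldl (fun lines row =>
      let key := PySem.Chars.strip (((PySem.Dict.mk row).getD "key" "").toList)
      if key.isEmpty then lines
      else lines ++ [['"'] ++ pvEscA key ++ ['"', ' ', '=', ' ', '"'] ++
                     pvEscA ((PySem.Dict.mk row).getD language "").toList ++ ['"', ';']]) []
  if lines.isEmpty then ""
  else String.ofList (PySem.Chars.join ['\n'] lines ++ ['\n'])

-- ===== PORT B =====
-- B's module-level ESC dict, and the per-character emission loop 'for c in s: out.append(ESC.get(c, c))'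
def pvESC : PySem.Dict Char (List Char) :=
  PySem.Dict.mk [('\\', ['\\', '\\']), ('"', ['\\', '"']),
                 ('\n', ['\\', 'n']), ('\r', ['\\', 'r']), ('\t', ['\\', 't'])]

def pvEmit (out : List Char) (s : List Char) : List Char :=
  s.foldl (fun o c => o ++ pvESC.getD c [c]) out

def serialize_ios_rows_alt (rows : List (List (String × String))) (language : String) : String :=
  String.ofList
    (rows.foldl (fun out row =>
      let key := PySem.Chars.strip (((PySem.Dict.mk row).getD "key" "").toList)
      if key = [] then out
      else pvEmit (pvEmit (out ++ ['"']) key ++ ['"', ' ', '=', ' ', '"'])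
             ((PySem.Dict.mk row).getD language "").toList ++ ['"', ';', '\n']) [])

-- ===== PRECONDITION & SPEC =====
-- Pre_ excludes rows with no "key" entry: there Python A (row["key"]) raises KeyError.
def Pre_serialize_ios_rows (rows : List (List (String × String))) (language : String) : Prop :=
  ∀ row ∈ rows, "key" ∈ row.map Prod.fst
instance (rows : List (List (String × String))) (language : String) : Decidable (Pre_serialize_ios_rows rows language) := by unfold Pre_serialize_ios_rows; infer_instance

def pvWitness_serialize_ios_rows : (List (List (String × String))) × String :=
  ([[("key", " app "), ("en", "a\"b\tc")], [("key", ""), ("en", "x")]], "en")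

def Spec_serialize_ios_rows (rows : List (List (String × String))) (language : String) (out : String) : Prop := out = serialize_ios_rows_alt rows language
instance (rows : List (List (String × String))) (language : String) (out : String) : Decidable (Spec_serialize_ios_rows rows language out) := by unfold Spec_serialize_ios_rows; infer_instance

-- ===== CLAIM (what is proved, stated in full; the proofs are below) =====
def Claim_equal_serialize_ios_rows : Prop := ∀ (rows : List (List (String × String))) (language : String), Dom_serialize_ios_rows rows language → Pre_serialize_ios_rows rows language → Spec_serialize_ios_rows rows language (serialize_ios_rows rows language)

-- ===== LEMMAS AND PROOFS =====

-- Python's s.replace(old, new) with a one-character old is a per-character flatMap.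
theorem replace_go_single (p : Char) (r : List Char) :
    ∀ (fuel : Nat) (cs acc : List Char), cs.length ≤ fuel →
      PySem.Chars.replace.go [p] r fuel cs acc =
        acc.reverse ++ cs.flatMap (fun c => if c = p then r else [c]) := by
  intro fuel
  induction fuel with
  | zero =>
    intro cs acc h
    have : cs = [] := List.eq_nil_of_length_eq_zero (Nat.le_zero.mp h)
    subst this
    simp [PySem.Chars.replace.go]
  | succ n ih =>
    intro cs acc h
    cases cs with
    | nil => simp [PySem.Chars.replace.go]
    | cons c t =>
      by_cases hc : c = p
      · subst hc
        have hpre : List.isPrefixOf [c] (c :: t) = true := by simp [List.isPrefixOf]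
        rw [PySem.Chars.replace.go, if_pos hpre]
        show PySem.Chars.replace.go [c] r n t (r.reverse ++ acc) = _
        rw [ih t (r.reverse ++ acc) (by simpa using Nat.le_of_succ_le_succ h)]
        simp [List.flatMap_cons]
      · have hpre : List.isPrefixOf [p] (c :: t) = false := by
          simp [List.isPrefixOf]
          exact fun hh => absurd hh.symm hc
        rw [PySem.Chars.replace.go, if_neg (by simp [hpre])]
        rw [ih t (c :: acc) (by simpa using Nat.le_of_succ_le_succ h)]
        simp [List.flatMap_cons, hc]

theorem replace_single (p : Char) (r : List Char) (cs : List Char) :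
    PySem.Chars.replace cs [p] r = cs.flatMap (fun c => if c = p then r else [c]) := by
  rw [PySem.Chars.replace]
  simp only [List.isEmpty_cons, Bool.false_eq_true, if_false]
  simpa using replace_go_single p r cs.length cs [] (le_refl _)

-- the escaped form of one character, shared description of both programs' escaping
def pvEscC (c : Char) : List Char := pvESC.getD c [c]

-- B's inner loop appends exactly the escaped characters
theorem emit_eq (s : List Char) : ∀ out : List Char, pvEmit out s = out ++ s.flatMap pvEscC := by
  induction s with
  | nil => intro out; simp [pvEmit]
  | cons c t ih =>
    intro out
    simp only [pvEmit, List.foldl_cons] at *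
    rw [ih (out ++ pvESC.getD c [c])]
    simp [pvEscC]

-- A's five sequential replaces compute the same per-character escaping
theorem escA_eq (cs : List Char) : pvEscA cs = cs.flatMap pvEscC := by
  unfold pvEscA
  rw [replace_single, replace_single, replace_single, replace_single, replace_single]
  induction cs with
  | nil => rfl
  | cons c t ih =>
    simp only [List.flatMap_cons, List.flatMap_append]
    rw [ih]
    congr 1
    by_cases h1 : c = '\\'
    · subst h1; decide
    by_cases h2 : c = '"'
    · subst h2; decide
    by_cases h3 : c = '\n'
    · subst h3; decide
    by_cases h4 : c = '\r'
    · subst h4; decide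
    by_cases h5 : c = '\t'
    · subst h5; decide
    simp [h1, h2, h3, h4, h5, pvEscC, pvESC, PySem.Dict.getD, PySem.Dict.get?,
          Ne.symm h1, Ne.symm h2, Ne.symm h3, Ne.symm h4, Ne.symm h5]

-- lines that carry their own newline vs "\n".join(lines) + "\n"
theorem join_newline (ls : List (List Char)) (h : ls ≠ []) :
    PySem.Chars.join ['\n'] ls ++ ['\n'] = ls.flatMap (fun l => l ++ ['\n']) := by
  induction ls with
  | nil => exact absurd rfl h
  | cons a t ih =>
    cases t with
    | nil => simp [PySem.Chars.join_singleton]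
    | cons b u =>
      rw [PySem.Chars.join_cons_cons, List.flatMap_cons, ← ih (by simp)]
      simp

-- the line A builds for a row (none = skipped), shared description of both loops
def pvLine? (language : String) (row : List (String × String)) : Option (List Char) :=
  let key := PySem.Chars.strip (((PySem.Dict.mk row).getD "key" "").toList)
  if key = [] then none
  else some (['"'] ++ key.flatMap pvEscC ++ ['"', ' ', '=', ' ', '"'] ++
             ((PySem.Dict.mk row).getD language "").toList.flatMap pvEscC ++ ['"', ';'])

theorem foldl_lines (language : String) :
    ∀ (rs : List (List (String × String))) (acc : List (List Char)),
      rs.foldl (fun lines row =>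
        let key := PySem.Chars.strip (((PySem.Dict.mk row).getD "key" "").toList)
        if key.isEmpty then lines
        else lines ++ [['"'] ++ pvEscA key ++ ['"', ' ', '=', ' ', '"'] ++
                       pvEscA ((PySem.Dict.mk row).getD language "").toList ++ ['"', ';']]) acc
      = acc ++ rs.filterMap (pvLine? language) := by
  intro rs
  induction rs with
  | nil => intro acc; simp
  | cons r t ih =>
    intro acc
    simp only [List.foldl_cons, List.filterMap_cons]
    rw [ih]
    by_cases hk : PySem.Chars.strip (((PySem.Dict.mk r).getD "key" "").toList) = []
    · simp [pvLine?, hk]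
    · simp [pvLine?, hk, List.isEmpty_iff, escA_eq, List.append_assoc]

-- B's outer loop flushes exactly the same lines, each followed by a newline
theorem emit_rows (language : String) :
    ∀ (rs : List (List (String × String))) (out : List Char),
      rs.foldl (fun out row =>
        let key := PySem.Chars.strip (((PySem.Dict.mk row).getD "key" "").toList)
        if key = [] then out
        else pvEmit (pvEmit (out ++ ['"']) key ++ ['"', ' ', '=', ' ', '"'])
               ((PySem.Dict.mk row).getD language "").toList ++ ['"', ';', '\n']) out
      = out ++ (rs.filterMap (pvLine? language)).flatMap (fun l => l ++ ['\n']) := by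
  intro rs
  induction rs with
  | nil => intro out; simp
  | cons r t ih =>
    intro out
    simp only [List.foldl_cons, List.filterMap_cons]
    by_cases hk : PySem.Chars.strip (((PySem.Dict.mk r).getD "key" "").toList) = []
    · simp only [hk]
      rw [ih]
      simp [pvLine?, hk]
    · simp only [hk]
      rw [ih, emit_eq, emit_eq]
      simp [pvLine?, hk, List.append_assoc]

-- ===== VERDICT (by name: the statement is the Claim_ definition above) =====
theorem serialize_ios_rows_spec : Claim_equal_serialize_ios_rows := by
  intro rows language _ _
  unfold Spec_serialize_ios_rows serialize_ios_rows serialize_ios_rows_alt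
  rw [foldl_lines language rows [], emit_rows language rows []]
  simp only [List.nil_append]
  by_cases h : rows.filterMap (pvLine? language) = []
  · simp [h]
  · rw [if_neg (by simp [h]), join_newline _ h]
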